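-- pv_equiv track=rewrite | github.com/frank613/tools-ntnu | wav2vec2/peakyness/compute_per.py | filter_ref
-- ===== SOURCE A (Python) =====
-- spec_tokens = set(("<pad>", "<s>", "</s>", "<unk>", "|"))
--
-- sil_tokens = set(["sil", "SIL", "SPN"])
--
-- def rmdup(p_list):
--     prev = None
--     new_list = []
--     for p in p_list:
--         if p != prev:
--             new_list.append(p)
--         prev = p
--     return new_list
--
-- def filter_ref(hyp_map, ref_map):
--     filtered_pair_list = []
--     vocabs = set((" ".join(list(hyp_map.values())).split(' ')))
--     vocabs = list(vocabs - sil_tokens - spec_tokens)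
--     for k,v in hyp_map.items():
--         if k in ref_map.keys():
--             ref_filtered = [ phone for phone in ref_map[k].split(';') if phone in vocabs]
--             hyp_filtered = [ phone for phone in v.split(' ') if phone in vocabs]
--             ref = rmdup(ref_filtered)
--             hyp = rmdup(hyp_filtered)
--             filtered_pair_list.append((" ".join(hyp), " ".join(ref)))
--
--     return filtered_pair_list
-- ===== SOURCE B (Python) =====
-- spec_tokens = set(("<pad>", "<s>", "</s>", "<unk>", "|"))
--
-- sil_tokens = set(["sil", "SIL", "SPN"])
--
-- def _keep(phones, sep, vocabs):
--     # fused filter + consecutive-dedup in one pass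
--     kept = []
--     prev = None
--     for phone in phones.split(sep):
--         if phone in vocabs and phone != prev:
--             kept.append(phone)
--             prev = phone
--     return " ".join(kept)
--
-- def filter_ref(hyp_map, ref_map):
--     vocabs = set(" ".join(hyp_map.values()).split(' ')) - sil_tokens - spec_tokens
--     out = []
--     for k, v in hyp_map.items():
--         if k in ref_map:
--             out.append((_keep(v, ' ', vocabs), _keep(ref_map[k], ';', vocabs)))
--     return out
-- ===== Notes on version B (the rewrite author's own statement) =====
-- stated objective: simpler
-- what changed: Drops the separate rmdup helper and the intermediate filtered lists: one fused pass per sequence keeps a phone only if it is in the vocab set and differs from the last kept phone (prev), so filter and consecutive-dedup happen in a single loop.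
import Mathlib
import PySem

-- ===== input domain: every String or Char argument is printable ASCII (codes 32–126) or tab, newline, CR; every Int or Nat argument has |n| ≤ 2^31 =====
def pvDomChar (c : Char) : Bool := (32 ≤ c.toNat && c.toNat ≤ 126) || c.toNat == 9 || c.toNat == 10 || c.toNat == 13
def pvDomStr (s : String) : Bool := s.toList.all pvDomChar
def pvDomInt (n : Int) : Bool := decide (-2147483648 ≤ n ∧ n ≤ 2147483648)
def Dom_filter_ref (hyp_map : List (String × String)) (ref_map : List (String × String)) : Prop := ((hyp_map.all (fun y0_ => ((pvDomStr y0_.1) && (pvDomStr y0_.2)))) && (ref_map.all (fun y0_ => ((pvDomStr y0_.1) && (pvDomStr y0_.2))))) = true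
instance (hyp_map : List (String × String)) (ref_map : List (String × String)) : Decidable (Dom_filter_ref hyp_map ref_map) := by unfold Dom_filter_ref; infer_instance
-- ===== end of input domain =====

-- B fuses A's two passes (filter comprehension, then rmdup) into one loop with a `prev` accumulator; objective: simpler.

-- ===== PORT A =====
-- s.split(sep): sep is always a nonempty literal here, so split? returns some (exact)
def pySplit (s : String) (sep : String) : List String := (PySem.Str.split? s sep).getD []

def pvSpecTokens : PySem.Set String :=
  PySem.Set.ofList ["<pad>", "<s>", "</s>", "<unk>", "|"]

def pvSilTokens : PySem.Set String :=
  PySem.Set.ofList ["sil", "SIL", "SPN"]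

-- rmdup: foldl over (new_list, prev)
def rmdup (p_list : List String) : List String :=
  (p_list.foldl
    (fun (st : List String × Option String) p =>
      (if some p ≠ st.2 then st.1 ++ [p] else st.1, some p))
    ([], none)).1

def filter_ref (hyp_map : List (String × String)) (ref_map : List (String × String)) : List (String × String) :=
  let hd := PySem.Dict.ofList hyp_map
  let rd := PySem.Dict.ofList ref_map
  let vocabs0 := PySem.Set.ofList (pySplit (PySem.Str.join " " hd.values) " ")
  let vocabs := PySem.Set.diff (PySem.Set.diff vocabs0 pvSilTokens) pvSpecTokens
  hd.items.foldl
    (fun acc kv =>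
      if rd.contains kv.1 then
        let ref_filtered := (pySplit (rd.getD kv.1 "") ";").filter (fun p => vocabs.contains p)
        let hyp_filtered := (pySplit kv.2 " ").filter (fun p => vocabs.contains p)
        acc ++ [(PySem.Str.join " " (rmdup hyp_filtered), PySem.Str.join " " (rmdup ref_filtered))]
      else acc)
    []

-- ===== PORT B =====
-- fused filter + consecutive-dedup in one pass, then join
def keepPhones (phones : String) (sep : String) (vocabs : PySem.Set String) : String :=
  PySem.Str.join " "
    ((pySplit phones sep).foldl
      (fun (st : List String × Option String) phone =>
        if vocabs.contains phone && some phone ≠ st.2 then (st.1 ++ [phone], some phone) else st)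
      ([], none)).1

def filter_ref_alt (hyp_map : List (String × String)) (ref_map : List (String × String)) : List (String × String) :=
  let hd := PySem.Dict.ofList hyp_map
  let rd := PySem.Dict.ofList ref_map
  let vocabs := PySem.Set.diff (PySem.Set.diff (PySem.Set.ofList (pySplit (PySem.Str.join " " hd.values) " ")) pvSilTokens) pvSpecTokens
  hd.items.foldl
    (fun acc kv =>
      if rd.contains kv.1 then
        acc ++ [(keepPhones kv.2 " " vocabs, keepPhones (rd.getD kv.1 "") ";" vocabs)]
      else acc)
    []

-- ===== PRECONDITION & SPEC =====
def Spec_filter_ref (hyp_map : List (String × String)) (ref_map : List (String × String)) (out : List (String × String)) : Prop := out = filter_ref_alt hyp_map ref_map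
instance (hyp_map : List (String × String)) (ref_map : List (String × String)) (out : List (String × String)) : Decidable (Spec_filter_ref hyp_map ref_map out) := by unfold Spec_filter_ref; infer_instance

-- ===== CLAIM (what is proved, stated in full; the proofs are below) =====
def Claim_equal_filter_ref : Prop := ∀ (hyp_map : List (String × String)) (ref_map : List (String × String)), Dom_filter_ref hyp_map ref_map → Spec_filter_ref hyp_map ref_map (filter_ref hyp_map ref_map)

-- ===== LEMMAS AND PROOFS =====

-- the fused loop over ps equals A's rmdup loop over the filtered list, for any state
theorem fused_eq_rmdup_filter (vocabs : PySem.Set String) (ps : List String)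
    (st : List String × Option String) :
    (ps.filter (fun p => vocabs.contains p)).foldl
        (fun (st : List String × Option String) p =>
          (if some p ≠ st.2 then st.1 ++ [p] else st.1, some p)) st
      = ps.foldl
        (fun (st : List String × Option String) phone =>
          if vocabs.contains phone && some phone ≠ st.2 then (st.1 ++ [phone], some phone) else st) st := by
  induction ps generalizing st with
  | nil => rfl
  | cons p ps ih =>
    simp only [List.filter_cons, List.foldl_cons]
    by_cases hc : vocabs.contains p = true
    · have hm : p ∈ vocabs := by simpa using hc
      rw [if_pos hc, List.foldl_cons, ih]
      congr 1
      by_cases hne : some p = st.2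
      · simp [hm, hne]
      · simp [hm, hne]
    · have hm : p ∉ vocabs := by simpa using hc
      rw [if_neg hc, ih]
      congr 1
      simp [hm]

theorem keepPhones_eq (vocabs : PySem.Set String) (phones sep : String) :
    keepPhones phones sep vocabs
      = PySem.Str.join " " (rmdup ((pySplit phones sep).filter (fun p => vocabs.contains p))) := by
  unfold keepPhones rmdup
  rw [fused_eq_rmdup_filter]

-- ===== VERDICT (by name: the statement is the Claim_ definition above) =====
theorem filter_ref_spec : Claim_equal_filter_ref := by
  intro hyp_map ref_map _
  unfold Spec_filter_ref filter_ref filter_ref_alt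
  simp only [keepPhones_eq]
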